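-- pv_equiv track=rewrite | github.com/XinnuoXu/AggGen | data_e2e/get_rst.py | sub_tree
-- ===== SOURCE A (Python) =====
-- def label_classify(item):
--     if item[0] == '(':
--         if item[1] == 'F':
--             return "fact"
--         else:
--             return "phrase"
--     elif item[0] == ')':
--         return "end"
--     elif item[0] == '*':
--         return "reference"
--     return "token"
--
-- def sub_tree(tree, idx):
--     ph_stack = ["F"]
--     subtrees = []
--     phrases = []
--     tokens = []
--     while idx < len(tree):
--         tok = tree[idx]
--         label = label_classify(tok)
--         if label == 'fact':
--             if len(tokens) > 0:
--                 phrases.append(' '.join(tokens))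
--                 subtrees.append('__tok__')
--                 del tokens[:]
--             if len(ph_stack) > 1:
--                 subtrees.append(ph_stack[-1])
--             subtrees.append(tok)
--             #print ("IN>>>", tok)
--             s_tree, sub_phs, idx = sub_tree(tree, idx+1)
--             phrases.extend(sub_phs)
--             subtrees = subtrees + s_tree
--             if len(ph_stack) > 1:
--                 subtrees = subtrees + [')', ')']
--             else:
--                 subtrees = subtrees + [')']
--             #print ("OUT<<<", phrases)
--             #print ("OUT<<<", subtrees)
--             #print ("OUT<<<", '~~~~~~~~~')
--         elif label == 'phrase':
--             ph_stack.append(tok)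
--         elif label == 'token':
--             tokens.append(tok)
--         elif label == 'end':
--             ph_stack.pop()
--             #print (ph_stack)
--             #print (tokens)
--             if len(ph_stack) == 0:
--                 if len(tokens) > 0:
--                     phrases.append(' '.join(tokens))
--                     subtrees.append('__tok__')
--                 return subtrees, phrases, idx
--         idx += 1
--     return subtrees, phrases, idx
-- ===== SOURCE B (Python) =====
-- def sub_tree(tree, idx):
--     # Iterative version: an explicit stack of parse frames [ph_stack, subtrees, phrases, tokens]
--     # replaces A's recursion.
--     frames = [[["F"], [], [], []]]
--     n = len(tree)
--     while idx < n or len(frames) > 1: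
--         if idx >= n:
--             # input exhausted inside a nested fact: unwind one frame into its parent
--             _, s, p, _ = frames.pop()
--             pph, psubs, pphs, _ = frames[-1]
--             psubs.extend(s)
--             psubs.extend([')', ')'] if len(pph) > 1 else [')'])
--             pphs.extend(p)
--             idx += 1
--             continue
--         tok = tree[idx]
--         ph, subs, phs, toks = frames[-1]
--         c = tok[0]
--         if c == '(':
--             if tok[1] == 'F':
--                 if toks:
--                     phs.append(' '.join(toks))
--                     subs.append('__tok__')
--                     del toks[:]
--                 if len(ph) > 1:
--                     subs.append(ph[-1])
--                 subs.append(tok)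
--                 frames.append([["F"], [], [], []])
--             else:
--                 ph.append(tok)
--         elif c == ')':
--             ph.pop()
--             if not ph:
--                 frames.pop()
--                 if toks:
--                     phs.append(' '.join(toks))
--                     subs.append('__tok__')
--                 if not frames:
--                     return subs, phs, idx
--                 pph, psubs, pphs, _ = frames[-1]
--                 psubs.extend(subs)
--                 psubs.extend([')', ')'] if len(pph) > 1 else [')'])
--                 pphs.extend(phs)
--         elif c != '*':
--             toks.append(tok)
--         idx += 1
--     _, subs, phs, _ = frames[0]
--     return subs, phs, idx
-- ===== Notes on version B (the rewrite author's own statement) =====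
-- stated objective: alternative
-- what changed: A's recursive-descent parser (one recursive call per nested fact) is replaced by a single iterative loop over an explicit stack of parse frames, each frame holding its own ph_stack/subtrees/phrases/tokens, merged into its parent when it closes or the input runs out.
-- outside the precondition, e.g. on sub_tree([')', ''], 0): A returns ([], [], 0), B returns ([], [], 0)
import Mathlib
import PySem

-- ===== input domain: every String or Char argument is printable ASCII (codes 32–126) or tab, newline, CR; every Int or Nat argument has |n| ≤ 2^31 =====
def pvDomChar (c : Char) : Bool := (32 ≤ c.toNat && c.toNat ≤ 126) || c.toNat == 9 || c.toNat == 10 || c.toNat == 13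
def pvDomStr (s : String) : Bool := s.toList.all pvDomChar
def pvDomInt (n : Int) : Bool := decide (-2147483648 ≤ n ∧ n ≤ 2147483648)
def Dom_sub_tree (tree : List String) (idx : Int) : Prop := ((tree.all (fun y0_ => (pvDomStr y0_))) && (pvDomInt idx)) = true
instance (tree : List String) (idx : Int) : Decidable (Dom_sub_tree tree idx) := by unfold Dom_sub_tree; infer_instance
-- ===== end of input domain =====

-- B replaces A's recursion by one iterative loop over an explicit stack of parse frames (alternative decomposition, same cost).
-- A mutates nothing observable: both ports are about the returned triple only.

-- ===== PORT A =====
-- transliteration of label_classify; `none` exactly where Python raises IndexError (item '' or lone '(')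
def labelClassify (item : String) : Option String :=
  match PySem.Str.pyGet? item 0 with
  | none => none
  | some c =>
    if c = '(' then
      match PySem.Str.pyGet? item 1 with
      | none => none
      | some c1 => if c1 = 'F' then some "fact" else some "phrase"
    else if c = ')' then some "end"
    else if c = '*' then some "reference"
    else some "token"

-- A's while-loop with its recursive call; fuel is a pure totality device, `none` = fuel ran out
-- or a Python IndexError (both excluded below).  ph_stack is kept top-first (Python's list end = head).
def loopA : Nat → List String → Int → List String → List String → List String → List String →
    Option (List String × List String × Int)
  | 0, _, _, _, _, _, _ => none
  | n+1, tree, idx, ph, subtrees, phrases, tokens =>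
    if idx < (tree.length : Int) then
      match PySem.List.pyGet? tree idx with
      | none => none
      | some tok =>
        match labelClassify tok with
        | none => none
        | some label =>
          if label = "fact" then
            let phrases1 := if tokens.length > 0 then phrases ++ [PySem.Str.join " " tokens] else phrases
            let subtrees1 := if tokens.length > 0 then subtrees ++ ["__tok__"] else subtrees
            let subtrees2 := if ph.length > 1 then subtrees1 ++ [ph.headD ""] else subtrees1
            match loopA n tree (idx+1) ["F"] [] [] [] with
            | none => none
            | some (s1, p1, i1) =>
              loopA n tree (i1+1) ph
                ((subtrees2 ++ [tok]) ++ s1 ++ (if ph.length > 1 then [")", ")"] else [")"]))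
                (phrases1 ++ p1) []
          else if label = "phrase" then
            loopA n tree (idx+1) (tok :: ph) subtrees phrases tokens
          else if label = "token" then
            loopA n tree (idx+1) ph subtrees phrases (tokens ++ [tok])
          else if label = "end" then
            match ph with
            | [] => none
            | _ :: phrest =>
              if phrest.length = 0 then
                let phrases1 := if tokens.length > 0 then phrases ++ [PySem.Str.join " " tokens] else phrases
                let subtrees1 := if tokens.length > 0 then subtrees ++ ["__tok__"] else subtrees
                some (subtrees1, phrases1, idx)
              else loopA n tree (idx+1) phrest subtrees phrases tokens
          else -- "reference"
            loopA n tree (idx+1) ph subtrees phrases tokens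
    else some (subtrees, phrases, idx)

def sub_tree (tree : List String) (idx : Int) : List String × List String × Int :=
  (loopA (((tree.length : Int) - idx).toNat + 1) tree idx ["F"] [] [] []).getD ([], [], idx)

-- ===== PORT B =====
-- one iterative loop over a stack of frames (ph_stack, subtrees, phrases, tokens); junk value where
-- Source B raises IndexError (excluded below).  ph_stack top-first, as in port A.
def loopB (tree : List String) (idx : Int)
    (frames : List (List String × List String × List String × List String)) :
    List String × List String × Int :=
  match frames with
  | [] => ([], [], idx)  -- unreachable: sub_tree_alt starts with one frame and the last frame returns
  | (ph, subs, phs, toks) :: fs =>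
    if idx < (tree.length : Int) then
      match PySem.List.pyGet? tree idx with
      | none => ([], [], idx)
      | some tok =>
        match PySem.Str.pyGet? tok 0 with
        | none => ([], [], idx)
        | some c =>
          if c = '(' then
            match PySem.Str.pyGet? tok 1 with
            | none => ([], [], idx)
            | some c1 =>
              if c1 = 'F' then
                let phs1 := if toks.length > 0 then phs ++ [PySem.Str.join " " toks] else phs
                let subs1 := if toks.length > 0 then subs ++ ["__tok__"] else subs
                let subs2 := if ph.length > 1 then subs1 ++ [ph.headD ""] else subs1
                loopB tree (idx+1) ((["F"], [], [], []) :: (ph, subs2 ++ [tok], phs1, []) :: fs)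
              else loopB tree (idx+1) ((tok :: ph, subs, phs, toks) :: fs)
          else if c = ')' then
            match ph with
            | [] => ([], [], idx)
            | _ :: phrest =>
              if phrest.length = 0 then
                let phs1 := if toks.length > 0 then phs ++ [PySem.Str.join " " toks] else phs
                let subs1 := if toks.length > 0 then subs ++ ["__tok__"] else subs
                match fs with
                | [] => (subs1, phs1, idx)
                | (pph, psubs, pphs, ptoks) :: fs' =>
                  loopB tree (idx+1)
                    ((pph, psubs ++ subs1 ++ (if pph.length > 1 then [")", ")"] else [")"]),
                      pphs ++ phs1, ptoks) :: fs')
              else loopB tree (idx+1) ((phrest, subs, phs, toks) :: fs)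
          else if c = '*' then
            loopB tree (idx+1) ((ph, subs, phs, toks) :: fs)
          else
            loopB tree (idx+1) ((ph, subs, phs, toks ++ [tok]) :: fs)
    else
      match fs with
      | [] => (subs, phs, idx)
      | (pph, psubs, pphs, ptoks) :: fs' =>
        loopB tree (idx+1)
          ((pph, psubs ++ subs ++ (if pph.length > 1 then [")", ")"] else [")"]),
            pphs ++ phs, ptoks) :: fs')
  termination_by 2 * (((tree.length : Int) - idx).toNat) + frames.length
  decreasing_by all_goals simp_wf; omega

def sub_tree_alt (tree : List String) (idx : Int) : List String × List String × Int :=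
  loopB tree idx [(["F"], [], [], [])]

-- ===== PRECONDITION & SPEC =====
-- Pre_ excludes exactly the inputs where Python can hit an IndexError: idx below -len(tree) while the
-- loop is entered, or an empty token / a lone "(" in the part of tree the scan can reach (all of tree
-- when idx is negative, positions from idx on when idx ≥ 0).  A returns on a few such lists when it
-- returns before reaching the malformed token; B returns the same value there, see cites.
def Pre_sub_tree (tree : List String) (idx : Int) : Prop :=
  (0 ≤ idx → ∀ s ∈ tree.drop idx.toNat,
      s.toList ≠ [] ∧ (s.toList.head? = some '(' → 2 ≤ s.toList.length)) ∧
  (idx < 0 → -(tree.length : Int) ≤ idx ∧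
    ∀ s ∈ tree, s.toList ≠ [] ∧ (s.toList.head? = some '(' → 2 ≤ s.toList.length))
instance (tree : List String) (idx : Int) : Decidable (Pre_sub_tree tree idx) := by
  unfold Pre_sub_tree; infer_instance
def pvWitness_sub_tree : List String × Int := (["w", "(p", "(Fa", "x", ")", ")", "y", ")"], 0)

def Spec_sub_tree (tree : List String) (idx : Int) (out : List String × List String × Int) : Prop := out = sub_tree_alt tree idx
instance (tree : List String) (idx : Int) (out : List String × List String × Int) : Decidable (Spec_sub_tree tree idx out) := by unfold Spec_sub_tree; infer_instance

-- ===== CLAIM (what is proved, stated in full; the proofs are below) =====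
def Claim_equal_sub_tree : Prop := ∀ (tree : List String) (idx : Int), Dom_sub_tree tree idx → Pre_sub_tree tree idx → Spec_sub_tree tree idx (sub_tree tree idx)

-- ===== LEMMAS AND PROOFS =====

-- what loopB does once the frame on top of fs returns (s, p, i) in A's recursion
def afterRet (tree : List String) (fs : List (List String × List String × List String × List String))
    (s p : List String) (i : Int) : List String × List String × Int :=
  match fs with
  | [] => (s, p, i)
  | (pph, psubs, pphs, ptoks) :: fs' =>
    loopB tree (i+1)
      ((pph, psubs ++ s ++ (if pph.length > 1 then [")", ")"] else [")"]),
        pphs ++ p, ptoks) :: fs')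

lemma sim : ∀ (n : Nat) (tree : List String) (idx : Int) (ph sub phr tok : List String)
    (fs : List (List String × List String × List String × List String))
    (s p : List String) (i : Int),
    loopA n tree idx ph sub phr tok = some (s, p, i) →
    loopB tree idx ((ph, sub, phr, tok) :: fs) = afterRet tree fs s p i := by
  intro n
  induction n with
  | zero => intro tree idx ph sub phr tok fs s p i h; simp [loopA] at h
  | succ n ih =>
    intro tree idx ph sub phr tok fs s p i h
    rw [loopA.eq_def] at h; dsimp only at h
    rw [loopB.eq_def]; dsimp only
    by_cases hlt : idx < (tree.length : Int)
    · rw [if_pos hlt] at h ⊢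
      cases hg : PySem.List.pyGet? tree idx with
      | none => simp [hg] at h
      | some tok0 =>
        simp only [hg] at h ⊢
        cases h0 : PySem.List.pyGet? tok0.toList 0 with
        | none => simp [labelClassify, h0] at h
        | some c =>
          simp only [labelClassify, PySem.Str.pyGet?_eq, PySem.Chars.pyGet?_eq_listPyGet?, h0] at h ⊢
          by_cases hc : c = '('
          · rw [if_pos hc] at h ⊢
            cases h1 : PySem.List.pyGet? tok0.toList 1 with
            | none => simp [h1] at h
            | some c1 =>
              simp only [h1] at h ⊢
              by_cases hF : c1 = 'F'
              · rw [if_pos hF] at h ⊢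
                dsimp only at h
                simp only [String.reduceEq, reduceIte] at h
                cases hch : loopA n tree (idx+1) ["F"] [] [] [] with
                | none => simp [hch] at h
                | some r =>
                  obtain ⟨s1, p1, i1⟩ := r
                  simp only [hch] at h
                  rw [ih _ _ _ _ _ _ _ _ _ _ hch]
                  dsimp only [afterRet]
                  exact ih _ _ _ _ _ _ fs _ _ _ h
              · rw [if_neg hF] at h ⊢
                dsimp only at h
                simp only [String.reduceEq, reduceIte] at h
                exact ih _ _ _ _ _ _ _ _ _ _ h
          · rw [if_neg hc] at h ⊢
            by_cases hce : c = ')'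
            · rw [if_pos hce] at h ⊢
              dsimp only at h
              simp only [String.reduceEq, reduceIte] at h
              cases ph with
              | nil => simp at h
              | cons p0 phrest =>
                dsimp only at h ⊢
                by_cases hz : phrest.length = 0
                · rw [if_pos hz] at h ⊢
                  simp only [Option.some.injEq, Prod.mk.injEq] at h
                  obtain ⟨hs, hp, hi⟩ := h
                  subst hs; subst hp; subst hi
                  cases fs with
                  | nil => rfl
                  | cons g fs' => obtain ⟨pph, psubs, pphs, ptoks⟩ := g; rfl
                · rw [if_neg hz] at h ⊢
                  exact ih _ _ _ _ _ _ _ _ _ _ h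
            · rw [if_neg hce] at h ⊢
              by_cases hcs : c = '*'
              · rw [if_pos hcs] at h ⊢
                dsimp only at h
                simp only [String.reduceEq, reduceIte] at h
                exact ih _ _ _ _ _ _ _ _ _ _ h
              · rw [if_neg hcs] at h ⊢
                dsimp only at h
                simp only [String.reduceEq, reduceIte] at h
                exact ih _ _ _ _ _ _ _ _ _ _ h
    · rw [if_neg hlt] at h ⊢
      simp only [Option.some.injEq, Prod.mk.injEq] at h
      obtain ⟨hs, hp, hi⟩ := h
      subst hs; subst hp; subst hi
      cases fs with
      | nil => rfl
      | cons g fs' => obtain ⟨pph, psubs, pphs, ptoks⟩ := g; rfl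

lemma labelClassify_isSome (s : String) (h1 : s.toList ≠ [])
    (h2 : s.toList.head? = some '(' → 2 ≤ s.toList.length) : (labelClassify s).isSome := by
  unfold labelClassify
  cases hl : s.toList with
  | nil => exact absurd hl h1
  | cons c cs =>
    have hget0 : PySem.Str.pyGet? s 0 = some c := by simp [pysem, hl]
    rw [hget0]
    by_cases hc : c = '('
    · subst hc
      have hlen : 2 ≤ s.toList.length := h2 (by rw [hl]; rfl)
      cases cs with
      | nil => rw [hl] at hlen; simp at hlen
      | cons c1 cs1 =>
        have hget1 : PySem.Str.pyGet? s 1 = some c1 := by simp [pysem, hl]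
        rw [hget1]
        simp
        split <;> simp
    · simp [hc]
      split <;> try simp
      split <;> simp

lemma loopA_idx_le : ∀ (n : Nat) (tree : List String) (idx : Int) (ph sub phr tok : List String)
    (s p : List String) (i : Int), loopA n tree idx ph sub phr tok = some (s, p, i) → idx ≤ i := by
  intro n
  induction n with
  | zero => intro tree idx ph sub phr tok s p i h; simp [loopA] at h
  | succ n ih =>
    intro tree idx ph sub phr tok s p i h
    rw [loopA.eq_def] at h; simp only [] at h
    by_cases hlt : idx < (tree.length : Int)
    · rw [if_pos hlt] at h
      cases hg : PySem.List.pyGet? tree idx with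
      | none => simp [hg] at h
      | some tok0 =>
        simp only [hg] at h
        cases hl : labelClassify tok0 with
        | none => simp [hl] at h
        | some label =>
          simp only [hl] at h
          by_cases hf : label = "fact"
          · rw [if_pos hf] at h
            cases hc : loopA n tree (idx+1) ["F"] [] [] [] with
            | none => simp [hc] at h
            | some r =>
              obtain ⟨s1, p1, i1⟩ := r
              simp only [hc] at h
              have h1 := ih _ _ _ _ _ _ _ _ _ hc
              have h2 := ih _ _ _ _ _ _ _ _ _ h
              omega
          · rw [if_neg hf] at h
            by_cases hp : label = "phrase"
            · rw [if_pos hp] at h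
              have := ih _ _ _ _ _ _ _ _ _ h; omega
            · rw [if_neg hp] at h
              by_cases ht : label = "token"
              · rw [if_pos ht] at h
                have := ih _ _ _ _ _ _ _ _ _ h; omega
              · rw [if_neg ht] at h
                by_cases he : label = "end"
                · rw [if_pos he] at h
                  cases ph with
                  | nil => simp at h
                  | cons p0 phrest =>
                    dsimp only at h
                    by_cases h0 : phrest.length = 0
                    · rw [if_pos h0] at h
                      simp only [Option.some.injEq, Prod.mk.injEq] at h
                      omega
                    · rw [if_neg h0] at h
                      have := ih _ _ _ _ _ _ _ _ _ h; omega
                · rw [if_neg he] at h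
                  have := ih _ _ _ _ _ _ _ _ _ h; omega
    · rw [if_neg hlt] at h
      simp only [Option.some.injEq, Prod.mk.injEq] at h
      omega

lemma loopA_isSome : ∀ (n : Nat) (tree : List String),
    (∀ s ∈ tree, s.toList ≠ [] ∧ (s.toList.head? = some '(' → 2 ≤ s.toList.length)) →
    ∀ (idx : Int) (ph sub phr tok : List String), -(tree.length : Int) ≤ idx → ph ≠ [] →
    ((tree.length : Int) - idx).toNat < n → (loopA n tree idx ph sub phr tok).isSome := by
  intro n
  induction n with
  | zero => intro tree hwf idx ph sub phr tok h1 h2 h3; omega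
  | succ n ih =>
    intro tree hwf idx ph sub phr tok h1 h2 h3
    rw [loopA.eq_def]; simp only []
    by_cases hlt : idx < (tree.length : Int)
    · rw [if_pos hlt]
      have hg0 : (PySem.List.pyGet? tree idx).isSome := by
        rw [Option.isSome_iff_ne_none, Ne, PySem.List.pyGet?_eq_none_iff]
        simp [PySem.Raise.InRange]; omega
      rcases Option.isSome_iff_exists.mp hg0 with ⟨tok0, hg⟩
      have hmem : tok0 ∈ tree := PySem.List.mem_of_pyGet?_eq_some tree hg
      have hl0 := labelClassify_isSome tok0 (hwf tok0 hmem).1 (hwf tok0 hmem).2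
      rcases Option.isSome_iff_exists.mp hl0 with ⟨label, hl⟩
      simp only [hg, hl]
      by_cases hf : label = "fact"
      · rw [if_pos hf]
        have hc0 := ih tree hwf (idx+1) ["F"] [] [] [] (by omega) (by simp) (by omega)
        rcases Option.isSome_iff_exists.mp hc0 with ⟨⟨s1, p1, i1⟩, hc⟩
        simp only [hc]
        have hi1 : idx + 1 ≤ i1 := loopA_idx_le _ _ _ _ _ _ _ _ _ _ hc
        exact ih tree hwf (i1+1) ph _ _ [] (by omega) h2 (by omega)
      · rw [if_neg hf]
        by_cases hp : label = "phrase"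
        · rw [if_pos hp]
          exact ih tree hwf (idx+1) _ _ _ _ (by omega) (by simp) (by omega)
        · rw [if_neg hp]
          by_cases ht : label = "token"
          · rw [if_pos ht]
            exact ih tree hwf (idx+1) _ _ _ _ (by omega) h2 (by omega)
          · rw [if_neg ht]
            by_cases he : label = "end"
            · rw [if_pos he]
              cases ph with
              | nil => exact absurd rfl h2
              | cons p0 phrest =>
                dsimp only
                by_cases h0 : phrest.length = 0
                · rw [if_pos h0]; simp
                · rw [if_neg h0]
                  exact ih tree hwf (idx+1) _ _ _ _ (by omega)
                    (by intro hx; rw [hx] at h0; exact h0 rfl) (by omega)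
            · rw [if_neg he]
              exact ih tree hwf (idx+1) _ _ _ _ (by omega) h2 (by omega)
    · rw [if_neg hlt]; simp

lemma loopA_isSome_nonneg : ∀ (n : Nat) (tree : List String) (lo : Int), 0 ≤ lo →
    (∀ s ∈ tree.drop lo.toNat, s.toList ≠ [] ∧ (s.toList.head? = some '(' → 2 ≤ s.toList.length)) →
    ∀ (idx : Int) (ph sub phr tok : List String), lo ≤ idx → ph ≠ [] →
    ((tree.length : Int) - idx).toNat < n → (loopA n tree idx ph sub phr tok).isSome := by
  intro n
  induction n with
  | zero => intro tree lo hlo hwf idx ph sub phr tok h1 h2 h3; omega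
  | succ n ih =>
    intro tree lo hlo hwf idx ph sub phr tok h1 h2 h3
    rw [loopA.eq_def]; simp only []
    by_cases hlt : idx < (tree.length : Int)
    · rw [if_pos hlt]
      have hg0 : (PySem.List.pyGet? tree idx).isSome := by
        rw [Option.isSome_iff_ne_none, Ne, PySem.List.pyGet?_eq_none_iff]
        simp [PySem.Raise.InRange]; omega
      rcases Option.isSome_iff_exists.mp hg0 with ⟨tok0, hg⟩
      have hmem : tok0 ∈ tree.drop lo.toNat := by
        rw [PySem.List.pyGet?_of_nonneg (h := by omega)] at hg
        have hidx : lo.toNat + (idx.toNat - lo.toNat) = idx.toNat := by omega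
        have : (tree.drop lo.toNat)[idx.toNat - lo.toNat]? = some tok0 := by
          rw [List.getElem?_drop, hidx]; exact hg
        exact List.mem_of_getElem? this
      have hl0 := labelClassify_isSome tok0 (hwf tok0 hmem).1 (hwf tok0 hmem).2
      rcases Option.isSome_iff_exists.mp hl0 with ⟨label, hl⟩
      simp only [hg, hl]
      by_cases hf : label = "fact"
      · rw [if_pos hf]
        have hc0 := ih tree lo hlo hwf (idx+1) ["F"] [] [] [] (by omega) (by simp) (by omega)
        rcases Option.isSome_iff_exists.mp hc0 with ⟨⟨s1, p1, i1⟩, hc⟩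
        simp only [hc]
        have hi1 : idx + 1 ≤ i1 := loopA_idx_le _ _ _ _ _ _ _ _ _ _ hc
        exact ih tree lo hlo hwf (i1+1) ph _ _ [] (by omega) h2 (by omega)
      · rw [if_neg hf]
        by_cases hp : label = "phrase"
        · rw [if_pos hp]
          exact ih tree lo hlo hwf (idx+1) _ _ _ _ (by omega) (by simp) (by omega)
        · rw [if_neg hp]
          by_cases ht : label = "token"
          · rw [if_pos ht]
            exact ih tree lo hlo hwf (idx+1) _ _ _ _ (by omega) h2 (by omega)
          · rw [if_neg ht]
            by_cases he : label = "end"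
            · rw [if_pos he]
              cases ph with
              | nil => exact absurd rfl h2
              | cons p0 phrest =>
                dsimp only
                by_cases h0 : phrest.length = 0
                · rw [if_pos h0]; simp
                · rw [if_neg h0]
                  exact ih tree lo hlo hwf (idx+1) _ _ _ _ (by omega)
                    (by intro hx; rw [hx] at h0; exact h0 rfl) (by omega)
            · rw [if_neg he]
              exact ih tree lo hlo hwf (idx+1) _ _ _ _ (by omega) h2 (by omega)
    · rw [if_neg hlt]; simp


-- ===== VERDICT (by name: the statement is the Claim_ definition above) =====
theorem sub_tree_spec : Claim_equal_sub_tree := by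
  intro tree idx _ hpre
  unfold Spec_sub_tree sub_tree sub_tree_alt
  have hs : (loopA (((tree.length : Int) - idx).toNat + 1) tree idx ["F"] [] [] []).isSome := by
    by_cases hpos : 0 ≤ idx
    · exact loopA_isSome_nonneg _ tree idx hpos (hpre.1 hpos) idx ["F"] [] [] []
        le_rfl (by simp) (by omega)
    · rcases hpre.2 (by omega) with ⟨hge, hwf⟩
      exact loopA_isSome _ tree hwf idx ["F"] [] [] [] hge (by simp) (by omega)
  rcases Option.isSome_iff_exists.mp hs with ⟨⟨s, p, i⟩, hA⟩
  rw [hA, sim _ tree idx _ _ _ _ [] s p i hA]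
  rfl
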